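-- pv_equiv track=rewrite | github.com/JaimeSCotta/Sentiment_Analysis_Web_App | sentimentAnalysisApp_v9.py | contar_apariciones
-- ===== SOURCE A (Python) =====
-- def contar_apariciones(sentimientos):
--     # Inicializar contadores
--     contador_positivo = 0
--     contador_negativo = 0
--
--     # Contar apariciones de POSITIVE y NEGATIVE
--     for sentimiento in sentimientos:
--         if sentimiento == "POSITIVE":
--             contador_positivo += 1
--         elif sentimiento == "NEGATIVE":
--             contador_negativo += 1
--
--     # Determinar el sentimiento dominante
--     if contador_positivo > contador_negativo:
--         return "POSITIVE"
--     elif contador_positivo < contador_negativo: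
--         return "NEGATIVE"
--     else:
--         return "NEUTRAL"
-- ===== SOURCE B (Python) =====
-- def contar_apariciones(sentimientos):
--     # Cancellation stack: each "POSITIVE"/"NEGATIVE" annihilates an opposing
--     # token on top of the stack, otherwise it is pushed; other tokens are
--     # ignored.  The stack is always homogeneous, so the survivor (if any)
--     # is the dominant sentiment; an empty stack means a tie.
--     stack = []
--     for s in sentimientos:
--         if s == "POSITIVE" or s == "NEGATIVE":
--             if stack and stack[-1] != s:
--                 stack.pop()
--             else:
--                 stack.append(s)
--     return stack[-1] if stack else "NEUTRAL"
-- ===== Notes on version B (the rewrite author's own statement) =====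
-- stated objective: alternative
-- what changed: Replaces the two counters and final comparison with a Boyer-Moore-style cancellation stack: opposing sentiments annihilate pairwise and the surviving stack top (or emptiness) decides the result.
import Mathlib
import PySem

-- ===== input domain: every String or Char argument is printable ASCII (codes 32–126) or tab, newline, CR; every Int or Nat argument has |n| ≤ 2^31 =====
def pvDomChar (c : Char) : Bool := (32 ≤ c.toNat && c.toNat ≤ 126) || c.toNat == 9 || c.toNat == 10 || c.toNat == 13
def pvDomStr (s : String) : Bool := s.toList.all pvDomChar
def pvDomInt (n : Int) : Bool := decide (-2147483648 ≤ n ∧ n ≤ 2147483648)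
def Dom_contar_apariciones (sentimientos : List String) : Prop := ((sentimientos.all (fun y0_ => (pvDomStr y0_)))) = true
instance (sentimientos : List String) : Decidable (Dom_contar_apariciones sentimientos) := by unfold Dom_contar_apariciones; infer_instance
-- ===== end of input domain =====

-- B replaces A's two counters with a pairwise-cancellation stack (opposing
-- sentiments annihilate; the survivor, if any, dominates); return value only.

-- ===== PORT A =====
-- A's loop: two counters (positivo, negativo) updated by an if/elif chain.
def contar_apariciones (sentimientos : List String) : String :=
  let counts := sentimientos.foldl
    (fun (c : Int × Int) sentimiento =>
      if sentimiento = "POSITIVE" then (c.1 + 1, c.2)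
      else if sentimiento = "NEGATIVE" then (c.1, c.2 + 1)
      else c)
    (0, 0)
  if counts.1 > counts.2 then "POSITIVE"
  else if counts.1 < counts.2 then "NEGATIVE"
  else "NEUTRAL"

-- ===== PORT B =====
-- B's loop body: Python mutates `stack` (append/pop at the end); here the
-- stack top is the list head — the same stack, same decisions in the same order.
def pvStep (stack : List String) (s : String) : List String :=
  if s = "POSITIVE" || s = "NEGATIVE" then
    match stack with
    | [] => s :: []                                    -- empty (falsy) stack → append
    | t :: rest => if t ≠ s then rest                  -- opposing top → pop
                   else s :: t :: rest                 -- same top → append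
  else stack

def contar_apariciones_alt (sentimientos : List String) : String :=
  let stack := sentimientos.foldl pvStep []
  match stack with
  | t :: _ => t                                        -- stack[-1]
  | [] => "NEUTRAL"

-- ===== PRECONDITION & SPEC =====
def Spec_contar_apariciones (sentimientos : List String) (out : String) : Prop := out = contar_apariciones_alt sentimientos
instance (sentimientos : List String) (out : String) : Decidable (Spec_contar_apariciones sentimientos out) := by unfold Spec_contar_apariciones; infer_instance

-- ===== CLAIM (what is proved, stated in full; the proofs are below) =====
def Claim_equal_contar_apariciones : Prop := ∀ (sentimientos : List String), Dom_contar_apariciones sentimientos → Spec_contar_apariciones sentimientos (contar_apariciones sentimientos)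

-- ===== LEMMAS AND PROOFS =====

-- The stack is always homogeneous; encode its state as a signed balance.
def pvEnc (n : Int) : List String :=
  if 0 ≤ n then List.replicate n.toNat "POSITIVE" else List.replicate (-n).toNat "NEGATIVE"

theorem pvEnc_pos (n : Int) (h : 0 < n) :
    pvEnc n = "POSITIVE" :: List.replicate (n.toNat - 1) "POSITIVE" := by
  rw [pvEnc, if_pos (by omega), show n.toNat = (n.toNat - 1) + 1 by omega, List.replicate_succ]
  simp

theorem pvEnc_neg (n : Int) (h : n < 0) :
    pvEnc n = "NEGATIVE" :: List.replicate ((-n).toNat - 1) "NEGATIVE" := by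
  rw [pvEnc, if_neg (by omega), show (-n).toNat = ((-n).toNat - 1) + 1 by omega, List.replicate_succ]
  simp

theorem pvEnc_zero : pvEnc 0 = [] := by rfl

-- One step of B's stack is one unit step of the signed balance.
theorem pvStep_enc (n : Int) (s : String) :
    pvStep (pvEnc n) s
      = pvEnc (n + (if s = "POSITIVE" then 1 else if s = "NEGATIVE" then -1 else 0)) := by
  by_cases hp : s = "POSITIVE"
  · subst hp
    rw [if_pos rfl]
    rcases lt_trichotomy n 0 with h | h | h
    · rw [pvEnc_neg n h, pvStep]
      rcases eq_or_lt_of_le (show n + 1 ≤ 0 by omega) with h1 | h1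
      · rw [show pvEnc (n+1) = [] from h1 ▸ pvEnc_zero, show ((-n).toNat - 1) = 0 by omega]
        simp
      · rw [pvEnc_neg (n+1) h1]
        simp only [decide_true, Bool.true_or, if_true, ne_eq, if_pos (by decide : ¬ ("NEGATIVE" : String) = "POSITIVE")]
        rw [show (-n).toNat - 1 = ((-(n+1)).toNat - 1) + 1 by omega, List.replicate_succ]
    · subst h; rw [pvEnc_zero, pvStep, show pvEnc (0+1) = ["POSITIVE"] from rfl]; simp
    · rw [pvEnc_pos n h, pvStep, pvEnc_pos (n+1) (by omega)]
      rw [show (n+1).toNat - 1 = (n.toNat - 1) + 1 by omega, List.replicate_succ]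
      simp
  · by_cases hq : s = "NEGATIVE"
    · subst hq
      rw [if_neg (by decide), if_pos rfl]
      rcases lt_trichotomy n 0 with h | h | h
      · rw [pvEnc_neg n h, pvStep, pvEnc_neg (n + -1) (by omega)]
        rw [show (-(n + -1)).toNat - 1 = ((-n).toNat - 1) + 1 by omega, List.replicate_succ]
        simp
      · subst h; rw [pvEnc_zero, pvStep, show pvEnc (0 + -1) = ["NEGATIVE"] from rfl]; simp
      · rw [pvEnc_pos n h, pvStep]
        simp only [decide_true, Bool.or_true, if_true, ne_eq, if_pos (by decide : ¬ ("POSITIVE" : String) = "NEGATIVE")]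
        rcases eq_or_lt_of_le (show 0 ≤ n + -1 by omega) with h1 | h1
        · rw [show pvEnc (n + -1) = [] from h1.symm ▸ pvEnc_zero, show (n.toNat - 1) = 0 by omega]
          rfl
        · rw [pvEnc_pos (n + -1) h1, show n.toNat - 1 = ((n + -1).toNat - 1) + 1 by omega, List.replicate_succ]
    · simp [pvStep, hp, hq]

-- Invariant: B's stack encodes A's positive count minus A's negative count.
theorem pv_stack_eq (sentimientos : List String) (p q : Int) :
    sentimientos.foldl pvStep (pvEnc (p - q))
      = pvEnc ((sentimientos.foldl
          (fun (c : Int × Int) sentimiento =>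
            if sentimiento = "POSITIVE" then (c.1 + 1, c.2)
            else if sentimiento = "NEGATIVE" then (c.1, c.2 + 1)
            else c)
          (p, q)).1
        - (sentimientos.foldl
            (fun (c : Int × Int) sentimiento =>
              if sentimiento = "POSITIVE" then (c.1 + 1, c.2)
              else if sentimiento = "NEGATIVE" then (c.1, c.2 + 1)
              else c)
            (p, q)).2) := by
  induction sentimientos generalizing p q with
  | nil => simp
  | cons s rest ih =>
    simp only [List.foldl_cons, pvStep_enc]
    split_ifs with h1 h2 <;>
      first
        | (rw [show p - q + 1 = (p + 1) - q by ring]; exact ih (p + 1) q)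
        | (rw [show p - q + (-1) = p - (q + 1) by ring]; exact ih p (q + 1))
        | (rw [show p - q + 0 = p - q by ring]; exact ih p q)

-- ===== VERDICT (by name: the statement is the Claim_ definition above) =====
theorem contar_apariciones_spec : Claim_equal_contar_apariciones := by
  intro sentimientos _
  unfold Spec_contar_apariciones contar_apariciones contar_apariciones_alt
  have h := pv_stack_eq sentimientos 0 0
  rw [show pvEnc ((0:Int) - 0) = [] from pvEnc_zero] at h
  simp only [h]
  set net := (sentimientos.foldl
      (fun (c : Int × Int) sentimiento =>
        if sentimiento = "POSITIVE" then (c.1 + 1, c.2)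
        else if sentimiento = "NEGATIVE" then (c.1, c.2 + 1)
        else c)
      (0, 0)).1
    - (sentimientos.foldl
        (fun (c : Int × Int) sentimiento =>
          if sentimiento = "POSITIVE" then (c.1 + 1, c.2)
          else if sentimiento = "NEGATIVE" then (c.1, c.2 + 1)
          else c)
        (0, 0)).2 with hnet
  rcases lt_trichotomy net 0 with hs | hs | hs
  · rw [pvEnc_neg net hs]
    split_ifs <;> first | rfl | omega
  · rw [show pvEnc net = [] by rw [hs]; rfl]
    split_ifs <;> first | rfl | omega
  · rw [pvEnc_pos net hs]
    split_ifs <;> first | rfl | omega
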